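-- pv_equiv track=rewrite | github.com/imelnyk/ArxivPapers | gpt/utils.py | smooth_sequence
-- ===== SOURCE A (Python) =====
-- def smooth_sequence(L1):
--     N = len(L1)
--     M = max(L1)
--
--     # Initialize memo table with infinities
--     memo = [[float('inf') for _ in range(M + 1)] for _ in range(N)]
--
--     # Base case
--     for j in range(M + 1):
--         memo[0][j] = abs(L1[0] - j)
--
--     # DP recurrence
--     for i in range(1, N):
--         for j in range(M + 1):
--             for k in range(j + 1):
--                 current_loss = abs(L1[i] - j)
--                 memo[i][j] = min(memo[i][j], memo[i - 1][k] + current_loss)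
--
--     # Reconstruct the optimal sequence
--     L2 = [0] * N
--     last_val = memo[N - 1].index(min(memo[N - 1]))
--     L2[N - 1] = last_val
--     for i in range(N - 2, -1, -1):
--         min_loss = float('inf')
--         for j in range(last_val + 1):
--             if memo[i][j] + abs(L2[i + 1] - last_val) < min_loss:
--                 min_loss = memo[i][j] + abs(L2[i + 1] - last_val)
--                 L2[i] = j
--         last_val = L2[i]
--
--     # Compute the total loss
--     total_loss = sum([abs(L2[i] - L1[i]) for i in range(N)])
--
--     return L2
-- ===== SOURCE B (Python) =====
-- def smooth_sequence(L1):
--     # O(N*M) DP: the inner min-over-k loop of the original is replaced by a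
--     # running prefix-minimum of the previous DP row.
--     N = len(L1)
--     M = max(L1)
--     row = [abs(L1[0] - j) for j in range(M + 1)]
--     rows = [row]
--     for i in range(1, N):
--         pref = []
--         best = row[0]
--         for v in row:
--             best = min(best, v)
--             pref.append(best)
--         row = [pref[j] + abs(L1[i] - j) for j in range(M + 1)]
--         rows.append(row)
--     L2 = [0] * N
--     last = rows[N - 1].index(min(rows[N - 1]))
--     L2[N - 1] = last
--     for i in range(N - 2, -1, -1):
--         seg = rows[i][:last + 1]
--         last = seg.index(min(seg))
--         L2[i] = last
--     return L2
-- ===== Notes on version B (the rewrite author's own statement) =====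
-- stated objective: faster
-- what changed: The O(M^2)-per-step inner min-over-k loop is replaced by a running prefix-minimum of the previous DP row, and the backward reconstruction becomes index-of-min over a prefix slice (the abs term in A's reconstruction is provably always 0).
import Mathlib
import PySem

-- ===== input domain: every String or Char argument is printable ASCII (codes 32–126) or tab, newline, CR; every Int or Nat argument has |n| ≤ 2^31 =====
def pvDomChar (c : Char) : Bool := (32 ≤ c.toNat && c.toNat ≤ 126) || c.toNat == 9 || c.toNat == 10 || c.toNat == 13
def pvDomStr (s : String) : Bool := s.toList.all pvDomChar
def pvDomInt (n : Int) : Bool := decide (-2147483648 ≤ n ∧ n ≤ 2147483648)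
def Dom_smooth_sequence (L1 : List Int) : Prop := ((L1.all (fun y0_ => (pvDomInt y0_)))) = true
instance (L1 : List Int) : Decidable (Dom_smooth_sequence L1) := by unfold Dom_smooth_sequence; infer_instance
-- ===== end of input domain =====

-- B replaces A's inner min-over-k loop by a running prefix-minimum of the previous DP row,
-- and the backward reconstruction by index-of-min over a prefix slice (objective: faster).

-- ===== PORT A =====
-- none plays float('inf'): in A the infinities are only ever compared and added, so this is exact.
-- Python's 'u < w' over possibly-infinite values:
def olt : Option Int → Option Int → Bool
  | some x, some y => decide (x < y)
  | some _, none => true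
  | none, _ => false

-- Python's min(u, w) (keeps u on ties) over possibly-infinite values:
def omin : Option Int → Option Int → Option Int
  | none, b => b
  | some x, none => some x
  | some x, some y => some (min x y)

-- body of A's DP loop 'for i in range(1, N)'; state = (memo rows so far, memo[i-1]); x = L1[i]
def aDP (Mn : Nat) (st : List (List (Option Int)) × List (Option Int)) (x : Int) :
    List (List (Option Int)) × List (Option Int) :=
  let row := (List.range (Mn+1)).map (fun j =>
    (List.range (j+1)).foldl (fun acc k =>
      omin acc ((st.2.getD k none).map (fun m => m + |x - (j:Int)|))) none)
  (st.1 ++ [row], row)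

-- body of A's reconstruction loop 'for i in range(N-2, -1, -1)'; state = (last_val, L2[i+1:])
def aBack (memo : List (List (Option Int))) (st2 : Nat × List Int) (i : Nat) : Nat × List Int :=
  let row := memo.getD i []
  let C : Int := |st2.2.headD 0 - (st2.1 : Int)|          -- abs(L2[i+1] - last_val)
  let res := (List.range (st2.1+1)).foldl (fun (acc : Option Int × Nat) j =>
      if olt ((row.getD j none).map (fun m => m + C)) acc.1
      then ((row.getD j none).map (fun m => m + C), j) else acc) (none, 0)
  (res.2, (res.2 : Int) :: st2.2)

def smooth_sequence (L1 : List Int) : List Int :=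
  match PySem.List.max? L1 (fun y => y) with
  | none => []        -- Python: max([]) raises ValueError (excluded by Pre_)
  | some M =>
    if M < 0 then []  -- Python: min() of the then-empty row memo[N-1] raises ValueError (excluded by Pre_)
    else
      let N := L1.length
      let Mn := M.toNat
      -- base case: memo[0][j] = abs(L1[0] - j)
      let row0 : List (Option Int) := (List.range (Mn+1)).map (fun (j : Nat) => some |L1.headD 0 - (j:Int)|)
      let memo := (L1.tail.foldl (aDP Mn) ([row0], row0)).1
      -- last_val = memo[N-1].index(min(memo[N-1]))
      let lastRow := memo.getD (N-1) []
      let mval := lastRow.tail.foldl (fun m v => if olt v m then v else m) (lastRow.headD none)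
      let last0 : Nat := (PySem.List.index? lastRow mval).getD 0
      (((List.range (N-1)).reverse).foldl (aBack memo) (last0, [(last0 : Int)])).2

-- ===== PORT B =====
-- running prefix minima of a row (B's 'best = min(best, v); pref.append(best)' loop);
-- row[0] on an empty row raises IndexError in Python (excluded by Pre_), headD 0 here.
def prefMins (row : List Int) : List Int :=
  (row.foldl (fun (st : Int × List Int) v => (min st.1 v, st.2 ++ [min st.1 v])) (row.headD 0, [])).2

-- body of B's DP loop; state = (rows so far, previous row)
def bDP (Mn : Nat) (st : List (List Int) × List Int) (x : Int) : List (List Int) × List Int :=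
  let pref := prefMins st.2
  let row := (List.range (Mn+1)).map (fun j => pref.getD j 0 + |x - (j:Int)|)
  (st.1 ++ [row], row)

-- body of B's reconstruction loop: last = seg.index(min(seg)) with seg = rows[i][:last+1]
def bBack (rows : List (List Int)) (st2 : Nat × List Int) (i : Nat) : Nat × List Int :=
  let seg := PySem.List.slice (rows.getD i []) none (some ((st2.1 : Int)+1))
  let m := (PySem.List.min? seg (fun y => y)).getD 0
  let idx : Nat := (PySem.List.index? seg m).getD 0
  (idx, (idx : Int) :: st2.2)

def smooth_sequence_alt (L1 : List Int) : List Int :=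
  match PySem.List.max? L1 (fun y => y) with
  | none => []        -- Python: max([]) raises ValueError (excluded by Pre_)
  | some M =>
    if M < 0 then []  -- Python: B raises on the then-empty rows too (excluded by Pre_)
    else
      let N := L1.length
      let Mn := M.toNat
      let row0 : List Int := (List.range (Mn+1)).map (fun (j : Nat) => |L1.headD 0 - (j:Int)|)
      let rows := (L1.tail.foldl (bDP Mn) ([row0], row0)).1
      let lastRow := rows.getD (N-1) []
      let m0 := (PySem.List.min? lastRow (fun y => y)).getD 0
      let last0 : Nat := (PySem.List.index? lastRow m0).getD 0
      (((List.range (N-1)).reverse).foldl (bBack rows) (last0, [(last0 : Int)])).2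

-- ===== PRECONDITION & SPEC =====
-- A raises ValueError on the empty list (max of []) and on lists whose maximum is negative
-- (min of the then-empty DP row); B raises on exactly those inputs as well.
def Pre_smooth_sequence (L1 : List Int) : Prop := L1 ≠ [] ∧ ∃ x ∈ L1, 0 ≤ x
instance (L1 : List Int) : Decidable (Pre_smooth_sequence L1) := by unfold Pre_smooth_sequence; infer_instance
def pvWitness_smooth_sequence : List Int := [1, 0, 2]

def Spec_smooth_sequence (L1 : List Int) (out : List Int) : Prop := out = smooth_sequence_alt L1
instance (L1 : List Int) (out : List Int) : Decidable (Spec_smooth_sequence L1 out) := by unfold Spec_smooth_sequence; infer_instance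

-- ===== CLAIM (what is proved, stated in full; the proofs are below) =====
def Claim_equal_smooth_sequence : Prop := ∀ (L1 : List Int), Dom_smooth_sequence L1 → Pre_smooth_sequence L1 → Spec_smooth_sequence L1 (smooth_sequence L1)

-- ===== LEMMAS AND PROOFS =====

-- running minima of a list, seeded with b
def runmins (b : Int) : List Int → List Int
  | [] => []
  | v :: vs => min b v :: runmins (min b v) vs

-- min of prev[0..j] (prev's head as seed)
def pmin (prev : List Int) (j : Nat) : Int := (prev.take (j+1)).foldl min (prev.headD 0)

-- first-argmin scan: best value, best index, next index
def fmi : Int → Nat → Nat → List Int → Nat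
  | _, bi, _, [] => bi
  | b, bi, k, v :: vs => if v < b then fmi v k (k+1) vs else fmi b bi (k+1) vs

lemma foldl_pref (l : List Int) : ∀ (b : Int) (acc : List Int),
    l.foldl (fun (st : Int × List Int) v => (min st.1 v, st.2 ++ [min st.1 v])) (b, acc)
      = (l.foldl min b, acc ++ runmins b l) := by
  induction l with
  | nil => intro b acc; simp [runmins]
  | cons v vs ih => intro b acc; simp [runmins, ih (min b v) (acc ++ [min b v])]

lemma prefMins_cons (a : Int) (l : List Int) : prefMins (a :: l) = a :: runmins a l := by
  simp [prefMins, foldl_pref]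

lemma runmins_getD : ∀ (l : List Int) (b : Int) (j : Nat), j < l.length →
    (runmins b l).getD j 0 = (l.take (j+1)).foldl min b := by
  intro l
  induction l with
  | nil => simp
  | cons v vs ih =>
    intro b j hj
    cases j with
    | zero => simp [runmins]
    | succ j => simpa [runmins] using ih (min b v) j (by simpa using hj)

lemma prefMins_getD (prev : List Int) (j : Nat) (hj : j < prev.length) :
    (prefMins prev).getD j 0 = pmin prev j := by
  match prev with
  | a :: l =>
    cases j with
    | zero => simp [prefMins_cons, pmin]
    | succ j =>
      have hjl : j < l.length := by simpa using hj
      rw [prefMins_cons, List.getD_cons_succ, runmins_getD l a j hjl]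
      simp [pmin]

lemma pmin_succ (prev : List Int) (j : Nat) (hj : j + 1 < prev.length) :
    pmin prev (j+1) = min (pmin prev j) (prev.getD (j+1) 0) := by
  unfold pmin
  have h : prev.take (j+1+1) = prev.take (j+1) ++ [prev[j+1]] := by
    rw [List.take_add_one, List.getElem?_eq_getElem hj]
    rfl
  rw [h, List.foldl_append, List.getD_eq_getElem _ _ hj]
  rfl

lemma innerA (prev : List Int) (c : Int) : ∀ (j : Nat), j < prev.length →
    (List.range (j+1)).foldl (fun acc k =>
        omin acc (((prev.map some).getD k none).map (fun m => m + c))) none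
      = some (pmin prev j + c) := by
  intro j
  induction j with
  | zero =>
    intro hj
    match prev, hj with
    | a :: l, _ => simp [List.range_succ, omin, pmin]
  | succ j ih =>
    intro hj
    have hj' : j < prev.length := by omega
    rw [List.range_succ, List.foldl_append, ih hj']
    simp only [List.foldl_cons, List.foldl_nil]
    have hget : ((prev.map some).getD (j+1) none) = some (prev.getD (j+1) 0) := by
      rw [List.getD_eq_getElem _ _ (by simpa using hj), List.getD_eq_getElem _ _ hj]
      simp
    rw [hget]
    simp [omin, pmin_succ prev j hj, min_add_add_right]

lemma rowEq (Mn : Nat) (prev : List Int) (hlen : prev.length = Mn+1) (x : Int) :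
    (List.range (Mn+1)).map (fun j =>
        (List.range (j+1)).foldl (fun acc k =>
          omin acc (((prev.map some).getD k none).map (fun m => m + |x - (j:Int)|))) none)
      = ((List.range (Mn+1)).map (fun j => (prefMins prev).getD j 0 + |x - (j:Int)|)).map some := by
  rw [List.map_map]
  apply List.map_congr_left
  intro j hj
  have hjl : j < prev.length := by rw [hlen]; simpa using hj
  simp only [Function.comp_apply]
  rw [innerA prev _ j hjl, prefMins_getD prev j hjl]

lemma rowsFoldRel (Mn : Nat) : ∀ (xs : List Int) (accB : List (List Int)) (rB : List Int),
    rB.length = Mn+1 →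
    xs.foldl (aDP Mn) (accB.map (List.map some), rB.map some)
      = ((xs.foldl (bDP Mn) (accB, rB)).1.map (List.map some),
         (xs.foldl (bDP Mn) (accB, rB)).2.map some) := by
  intro xs
  induction xs with
  | nil => intro accB rB h; rfl
  | cons x xs ih =>
    intro accB rB h
    rw [List.foldl_cons, List.foldl_cons]
    have hstep : aDP Mn (accB.map (List.map some), rB.map some) x
        = ((accB ++ [(List.range (Mn+1)).map (fun j => (prefMins rB).getD j 0 + |x - (j:Int)|)]).map (List.map some),
           ((List.range (Mn+1)).map (fun j => (prefMins rB).getD j 0 + |x - (j:Int)|)).map some) := by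
      simp only [aDP, rowEq Mn rB h x]
      simp
    rw [hstep, ih _ _ (by simp)]
    rfl

lemma rowsFoldProps (Mn : Nat) : ∀ (xs : List Int) (accB : List (List Int)) (rB : List Int),
    (∀ r ∈ accB, r.length = Mn+1) →
    (xs.foldl (bDP Mn) (accB, rB)).1.length = accB.length + xs.length
      ∧ (∀ r ∈ (xs.foldl (bDP Mn) (accB, rB)).1, r.length = Mn+1) := by
  intro xs
  induction xs with
  | nil => intro accB rB h; simpa using h
  | cons x xs ih =>
    intro accB rB h
    rw [List.foldl_cons]
    have := ih (accB ++ [(List.range (Mn+1)).map (fun j => (prefMins rB).getD j 0 + |x - (j:Int)|)])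
      ((List.range (Mn+1)).map (fun j => (prefMins rB).getD j 0 + |x - (j:Int)|))
      (by intro r hr
          rcases List.mem_append.mp hr with hr | hr
          · exact h r hr
          · simp at hr; simp [hr])
    constructor
    · have h1 := this.1
      simp only [bDP] at h1 ⊢
      rw [h1]; simp; omega
    · exact this.2

lemma foldA_zip (C : Int) : ∀ (l : List Int) (b : Int) (bi k : Nat),
    (l.zipIdx k).foldl (fun (acc : Option Int × Nat) p =>
        if olt (some (p.1 + C)) acc.1 then (some (p.1 + C), p.2) else acc) (some (b + C), bi)
      = (some (l.foldl min b + C), fmi b bi k l) := by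
  intro l
  induction l with
  | nil => intro b bi k; simp [fmi]
  | cons v vs ih =>
    intro b bi k
    have holt : olt (some (v + C)) (some (b + C)) = decide (v < b) := by
      simp [olt]
    rw [List.zipIdx_cons, List.foldl_cons]
    by_cases h : v < b
    · rw [if_pos (by rw [holt]; exact decide_eq_true h), ih v k (k+1)]
      have hmin : (v :: vs).foldl min b = vs.foldl min v := by
        simp [min_eq_right h.le]
      rw [hmin, show fmi b bi k (v :: vs) = fmi v k (k+1) vs from by simp [fmi, h]]
    · rw [if_neg (by rw [holt]; simp [h]), ih b bi (k+1)]
      have hmin : (v :: vs).foldl min b = vs.foldl min b := by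
        simp [min_eq_left (not_lt.mp h)]
      rw [hmin, show fmi b bi k (v :: vs) = fmi b bi (k+1) vs from by simp [fmi, h]]

lemma foldl_range_getD {β : Type} (g : β → Int → Nat → β) :
    ∀ (n : Nat) (s : List Int) (init : β), n ≤ s.length →
    (List.range n).foldl (fun acc j => g acc (s.getD j 0) j) init
      = ((s.take n).zipIdx 0).foldl (fun acc p => g acc p.1 p.2) init := by
  intro n
  induction n with
  | zero => simp
  | succ n ih =>
    intro s init h
    have hn : n < s.length := by omega
    rw [List.range_succ, List.foldl_append, ih s init (by omega)]
    rw [List.take_add_one, List.getElem?_eq_getElem hn, List.zipIdx_append, List.foldl_append]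
    simp [List.getElem?_eq_getElem hn, Nat.min_eq_left (le_of_lt hn)]

lemma fmi_eq : ∀ (l : List Int) (b : Int) (bi k : Nat),
    fmi b bi k l = if l.foldl min b < b then k + (List.idxOf? (l.foldl min b) l).getD 0 else bi := by
  intro l
  induction l with
  | nil => intro b bi k; simp [fmi]
  | cons v vs ih =>
    intro b bi k
    rw [show (v :: vs).foldl min b = vs.foldl min (min b v) from rfl]
    by_cases h : v < b
    · rw [show fmi b bi k (v :: vs) = fmi v k (k+1) vs by simp [fmi, h]]
      rw [min_eq_right h.le]
      set m := vs.foldl min v with hm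
      have hmv : m ≤ v := (PySem.List.foldl_min_le vs v).1
      have hlt : m < b := lt_of_le_of_lt hmv h
      rw [if_pos hlt, ih]
      by_cases hm2 : m < v
      · have hne : (v == m) = false := by simp; omega
        have hmem : m ∈ vs := by
          rcases PySem.List.foldl_min_mem vs v with h1 | h1
          · omega
          · exact h1
        obtain ⟨i, hi⟩ := Option.isSome_iff_exists.mp (List.isSome_idxOf?.mpr hmem)
        rw [if_pos hm2, List.idxOf?_cons, hne, hi]
        simp; omega
      · have : m = v := le_antisymm hmv (not_lt.mp hm2)
        rw [if_neg hm2, List.idxOf?_cons, this]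
        simp
    · rw [show fmi b bi k (v :: vs) = fmi b bi (k+1) vs by simp [fmi, h]]
      rw [min_eq_left (not_lt.mp h)]
      set m := vs.foldl min b with hm
      rw [ih]
      by_cases hm2 : m < b
      · have hne : (v == m) = false := by
          have : b ≤ v := not_lt.mp h
          simp; omega
        have hmem : m ∈ vs := by
          rcases PySem.List.foldl_min_mem vs b with h1 | h1
          · omega
          · exact h1
        obtain ⟨i, hi⟩ := Option.isSome_iff_exists.mp (List.isSome_idxOf?.mpr hmem)
        rw [if_pos hm2, if_pos hm2, List.idxOf?_cons, hne, hi]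
        simp; omega
      · rw [if_neg hm2, if_neg hm2]

lemma idx_first_min (a : Int) (rest : List Int) :
    (List.idxOf? (rest.foldl min a) (a :: rest)).getD 0 = fmi a 0 1 rest := by
  rw [fmi_eq]
  set m := rest.foldl min a with hm
  have hma : m ≤ a := (PySem.List.foldl_min_le rest a).1
  by_cases h : m < a
  · have hne : (a == m) = false := by simp; omega
    have hmem : m ∈ rest := by
      rcases PySem.List.foldl_min_mem rest a with h1 | h1
      · omega
      · exact h1
    obtain ⟨i, hi⟩ := Option.isSome_iff_exists.mp (List.isSome_idxOf?.mpr hmem)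
    rw [List.idxOf?_cons, hne, hi, if_pos h]
    simp; omega
  · have hma' : m = a := le_antisymm hma (not_lt.mp h)
    rw [List.idxOf?_cons, if_neg h, hma']
    simp

lemma idxOf?_getD_lt (v : Int) : ∀ (l : List Int), v ∈ l → (List.idxOf? v l).getD 0 < l.length := by
  intro l
  induction l with
  | nil => simp
  | cons a t ih =>
    intro hv
    rw [List.idxOf?_cons]
    by_cases h : (a == v) = true
    · simp [h]
    · have hvt : v ∈ t := by
        rcases hv with _ | hvt
        · simp at h
        · assumption
      obtain ⟨i, hi⟩ := Option.isSome_iff_exists.mp (List.isSome_idxOf?.mpr hvt)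
      have := ih hvt
      rw [hi] at this ⊢
      simp only [h, Option.map_some]
      simp at this ⊢
      omega

lemma idxOf?_map_some (v : Int) : ∀ (l : List Int),
    List.idxOf? (some v) (l.map some) = List.idxOf? v l := by
  intro l
  induction l with
  | nil => rfl
  | cons a t ih =>
    rw [List.map_cons, List.idxOf?_cons, List.idxOf?_cons, ih]
    have : ((some a : Option Int) == some v) = (a == v) := by
      by_cases h : a = v <;> simp [h]
    rw [this]

lemma minA_fold : ∀ (l : List Int) (a : Int),
    (l.map some).foldl (fun m v => if olt v m then v else m) (some a) = some (l.foldl min a) := by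
  intro l
  induction l with
  | nil => intro a; rfl
  | cons v vs ih =>
    intro a
    rw [List.map_cons, List.foldl_cons, List.foldl_cons]
    have : (if olt (some v) (some a) then (some v : Option Int) else some a) = some (min a v) := by
      by_cases h : v < a
      · simp [olt, h, min_eq_right h.le]
      · simp [olt, h, min_eq_left (not_lt.mp h)]
    rw [this, ih]

lemma take_cons_of_nonempty (row : List Int) (n : Nat) (h : row ≠ []) :
    ∃ a rest, row.take (n+1) = a :: rest := by
  match row with
  | a :: t => exact ⟨a, t.take n, by simp⟩

lemma recStep (row : List Int) (last : Nat) (hlast : last < row.length) (C : Int) :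
    ((List.range (last+1)).foldl (fun (acc : Option Int × Nat) j =>
        if olt (((row.map some).getD j none).map (fun m => m + C)) acc.1
        then (((row.map some).getD j none).map (fun m => m + C), j) else acc) (none, 0)).2
      = (PySem.List.index? (row.take (last+1))
          ((PySem.List.min? (row.take (last+1)) (fun y => y)).getD 0)).getD 0 := by
  have hrow : row ≠ [] := by intro h; rw [h] at hlast; simp at hlast
  obtain ⟨a, rest, hseg⟩ := take_cons_of_nonempty row last hrow
  have hcongr : (List.range (last+1)).foldl (fun (acc : Option Int × Nat) j =>
        if olt (((row.map some).getD j none).map (fun m => m + C)) acc.1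
        then (((row.map some).getD j none).map (fun m => m + C), j) else acc) (none, 0)
      = (List.range (last+1)).foldl (fun (acc : Option Int × Nat) j =>
        if olt (some (row.getD j 0 + C)) acc.1
        then (some (row.getD j 0 + C), j) else acc) (none, 0) := by
    apply PySem.List.foldl_congr_mem
    intro acc j hj
    have hjl : j < row.length := by
      have : j < last + 1 := List.mem_range.mp hj
      omega
    have : ((row.map some).getD j none) = some (row.getD j 0) := by
      rw [List.getD_eq_getElem _ _ (by simpa using hjl), List.getD_eq_getElem _ _ hjl]
      simp
    rw [this]
    rfl
  rw [hcongr]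
  rw [foldl_range_getD (fun acc v j => if olt (some (v + C)) acc.1 then (some (v + C), j) else acc)
        (last+1) row (none, 0) hlast]
  rw [hseg, List.zipIdx_cons, List.foldl_cons]
  have h1 : olt (some (a + C)) none = true := rfl
  simp only [h1, if_true]
  rw [foldA_zip C rest a 0 1]
  rw [PySem.List.min?_id_cons]
  simp only [Option.getD_some, PySem.List.index?]
  rw [idx_first_min]

-- generic: two folds agree when the step functions agree on all reachable states
lemma foldl_eq_of_inv {α β : Type} (P : β → Prop) (f g : β → α → β) :
    ∀ (l : List α) (st : β), P st → (∀ st a, a ∈ l → P st → f st a = g st a ∧ P (g st a)) →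
    l.foldl f st = l.foldl g st := by
  intro l
  induction l with
  | nil => intros; rfl
  | cons a t ih =>
    intro st hP hstep
    rw [List.foldl_cons, List.foldl_cons]
    obtain ⟨heq, hP'⟩ := hstep st a (by simp) hP
    rw [heq]
    exact ih _ hP' (fun st' a' ha' => hstep st' a' (by simp [ha']))

lemma getD_map_map (l : List (List Int)) (i : Nat) (h : i < l.length) :
    (l.map (List.map some)).getD i [] = (l.getD i []).map some := by
  rw [List.getD_eq_getElem _ _ (by simpa using h), List.getD_eq_getElem _ _ h]
  simp

lemma backStep (Mn : Nat) (rowsB : List (List Int)) (hlen : ∀ r ∈ rowsB, r.length = Mn+1)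
    (i : Nat) (hi : i < rowsB.length) (st2 : Nat × List Int) (hb : st2.1 ≤ Mn) :
    aBack (rowsB.map (List.map some)) st2 i = bBack rowsB st2 i
      ∧ (bBack rowsB st2 i).1 ≤ Mn := by
  have hmem : rowsB.getD i [] ∈ rowsB := by
    rw [List.getD_eq_getElem _ _ hi]
    exact List.getElem_mem hi
  have hrlen : (rowsB.getD i []).length = Mn+1 := hlen _ hmem
  have hlast : st2.1 < (rowsB.getD i []).length := by omega
  have hslice : PySem.List.slice (rowsB.getD i []) none (some ((st2.1 : Int)+1))
      = (rowsB.getD i []).take (st2.1+1) := by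
    rw [PySem.List.slice_to _ (by positivity)]
    congr 1
  have hrec := recStep (rowsB.getD i []) st2.1 hlast (|st2.2.headD 0 - (st2.1 : Int)|)
  have hres : aBack (rowsB.map (List.map some)) st2 i = bBack rowsB st2 i := by
    simp only [aBack, bBack, getD_map_map rowsB i hi, hslice, hrec]
  refine ⟨hres, ?_⟩
  -- the new index is an index into seg = rows[i][:last+1], hence ≤ last ≤ Mn
  obtain ⟨a, rest, hseg⟩ := take_cons_of_nonempty (rowsB.getD i []) st2.1
    (by intro h; rw [h] at hrlen; simp at hrlen)
  have hmval : ((PySem.List.min? ((rowsB.getD i []).take (st2.1+1)) (fun y => y)).getD 0)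
      ∈ (rowsB.getD i []).take (st2.1+1) := by
    rw [hseg, PySem.List.min?_id_cons, Option.getD_some]
    rcases PySem.List.foldl_min_mem rest a with h1 | h1
    · rw [h1]; simp
    · simp [h1]
  have hidx := idxOf?_getD_lt _ _ hmval
  have hseglen : ((rowsB.getD i []).take (st2.1+1)).length = st2.1 + 1 := by
    rw [List.length_take, hrlen]
    omega
  rw [hseglen] at hidx
  have hval : (bBack rowsB st2 i).1
      = (List.idxOf? ((PySem.List.min? ((rowsB.getD i []).take (st2.1+1)) (fun y => y)).getD 0)
          ((rowsB.getD i []).take (st2.1+1))).getD 0 := by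
    simp only [bBack, hslice]
    rfl
  rw [hval]
  omega

-- ===== VERDICT (by name: the statement is the Claim_ definition above) =====
theorem smooth_sequence_spec : Claim_equal_smooth_sequence := by
  intro L1 hdom hpre
  obtain ⟨hne, x, hx, hx0⟩ := hpre
  unfold Spec_smooth_sequence
  obtain ⟨M, hmax⟩ : ∃ M, PySem.List.max? L1 (fun y => y) = some M := by
    cases h : PySem.List.max? L1 (fun y => y) with
    | none => exact absurd ((PySem.List.max?_eq_none_iff L1 _).mp h) hne
    | some M => exact ⟨M, rfl⟩
  have hM : ¬ M < 0 := by
    have := PySem.List.max?_isMax hmax x hx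
    omega
  simp only [smooth_sequence, smooth_sequence_alt, hmax, if_neg hM]
  set Mn := M.toNat with hMn
  set row0 : List Int := (List.range (Mn+1)).map (fun (j : Nat) => |L1.headD 0 - (j:Int)|) with hrow0def
  have hlen0 : row0.length = Mn + 1 := by simp [hrow0def]
  have hA0 : (List.range (Mn+1)).map (fun (j : Nat) => some |L1.headD 0 - (j:Int)|) = row0.map some := by
    rw [hrow0def, List.map_map]
    rfl
  rw [hA0]
  have hfold := rowsFoldRel Mn L1.tail [row0] row0 hlen0
  simp only [List.map_cons, List.map_nil] at hfold
  rw [hfold]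
  simp only []
  set rowsB := (List.foldl (bDP Mn) ([row0], row0) L1.tail).1 with hrowsBdef
  have hprops := rowsFoldProps Mn L1.tail [row0] row0 (by
    intro r hr
    simp only [List.mem_singleton] at hr
    rw [hr]; exact hlen0)
  rw [← hrowsBdef] at hprops
  have hlenrows : ∀ r ∈ rowsB, r.length = Mn + 1 := hprops.2
  have hNpos : 0 < L1.length := List.length_pos_iff.mpr hne
  have hrowsLen : rowsB.length = L1.length := by
    have h1 := hprops.1
    have h2 : L1.tail.length = L1.length - 1 := by simp
    simp only [List.length_singleton] at h1
    omega
  have hNm1 : L1.length - 1 < rowsB.length := by omega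
  rw [getD_map_map rowsB _ hNm1]
  set lr := rowsB.getD (L1.length - 1) [] with hlrdef
  have hlrmem : lr ∈ rowsB := by
    rw [hlrdef, List.getD_eq_getElem _ _ hNm1]
    exact List.getElem_mem hNm1
  have hlrlen : lr.length = Mn + 1 := hlenrows _ hlrmem
  obtain ⟨a, t, hlrc⟩ : ∃ a t, lr = a :: t := by
    cases hl : lr with
    | nil => rw [hl] at hlrlen; simp at hlrlen
    | cons a t => exact ⟨a, t, rfl⟩
  rw [hlrc]
  simp only [List.map_cons, List.tail_cons, List.headD_cons]
  rw [minA_fold t a, PySem.List.min?_id_cons, Option.getD_some]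
  simp only [PySem.List.index?]
  have hidxmap : List.idxOf? (some (List.foldl min a t)) (some a :: List.map some t)
      = List.idxOf? (List.foldl min a t) (a :: t) := by
    rw [show (some a :: List.map some t) = (a :: t).map some from rfl]
    exact idxOf?_map_some _ _
  rw [hidxmap]
  set last0 : Nat := (List.idxOf? (List.foldl min a t) (a :: t)).getD 0 with hlast0def
  have hmmem : List.foldl min a t ∈ a :: t := by
    rcases PySem.List.foldl_min_mem t a with h | h
    · rw [h]; exact List.mem_cons_self
    · exact List.mem_cons_of_mem _ h
  have hlast0 : last0 ≤ Mn := by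
    have hlt := idxOf?_getD_lt _ _ hmmem
    have h4 : (a :: t).length = Mn + 1 := by rw [← hlrc]; exact hlrlen
    rw [hlast0def]
    omega
  have hback := foldl_eq_of_inv (fun st : Nat × List Int => st.1 ≤ Mn)
      (aBack (rowsB.map (List.map some))) (bBack rowsB)
      ((List.range (L1.length - 1)).reverse) (last0, [(last0 : Int)]) hlast0
      (by
        intro st i hi hP
        have hi' : i < rowsB.length := by
          have := List.mem_range.mp (List.mem_reverse.mp hi)
          omega
        exact backStep Mn rowsB hlenrows i hi' st hP)
  rw [hback]
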